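-- pv_equiv track=rewrite | github.com/Arellano-Jann/LeetCoding-Fluffy-Couscous | CodeSignal/3/solution.py | solution
-- ===== SOURCE A (Python) =====
-- def solution(queryType, query):
--     total_val = 0
--     total_key = 0
--     total_get = 0
--     hashmap = {}
--
--     # def insert(x, y):
--     #     hashmap[x-total_key] = y - total_val
--     # def get(x):
--     #     total_get += hashmap[x - total_key] + total_val
--     # def addToKey(x):
--     #     total_key += x
--     # def addToValue(y):
--     #     total_val += y
--
--     for command, param in zip(queryType, query):
--         x = param[0]
--         y = param[-1]
--         if command == 'insert': # keeps the key in the normal place it would've been in the array if we weren't adding an int to all keys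
--             # insert(param[0], param[1])
--             hashmap[x-total_key] = y - total_val
--             # x - total_key adjusts the input key back to where it would be unadjusted. this has the property of then making sure that all keys are unique because the same operation is being subtracted from all of them and it only affects the keys that it wants to affects because total_key dynamically changes
--             # y - total_val adjusts the input value to be a true input value. this has the same properties as above
--         if command == 'get':
--             # get(param[0])
--             total_get += hashmap[x - total_key] + total_val
--             # x - total_key makes sure we get the correct key since the adjustments of total_key is dynamic, this always gets the desired key
--             # total_val is added because the true value is stored in the hashmap. adding 5 to all values means adding 5 to the true value either at the end or the start. the operations are the same
--         if command == 'addToKey':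
--             # addToKey(param[0])
--             total_key += x # adjusts the modifier of the keys
--         if command == 'addToValue':
--             # addToValue(param[0])
--             total_val += x
--
--     return total_get # asks for the sum of all get commands
-- ===== SOURCE B (Python) =====
-- def solution(queryType, query):
--     # B: keep the TRUE keys/values in the dict; rebuild it on addToKey/addToValue
--     # instead of tracking global offsets. (Different decomposition, not faster.)
--     hashmap = {}
--     total = 0
--     for command, param in zip(queryType, query):
--         if command == 'insert':
--             hashmap[param[0]] = param[-1]
--         elif command == 'get':
--             total += hashmap[param[0]]
--         elif command == 'addToKey':
--             x = param[0]
--             hashmap = {k + x: v for k, v in hashmap.items()}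
--         elif command == 'addToValue':
--             x = param[0]
--             hashmap = {k: v + x for k, v in hashmap.items()}
--     return total
-- ===== Notes on version B (the rewrite author's own statement) =====
-- stated objective: alternative
-- what changed: B drops A's total_key/total_val offset bookkeeping and stores the true keys and values directly, rebuilding the dict with a comprehension on each addToKey/addToValue query.
import Mathlib
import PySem

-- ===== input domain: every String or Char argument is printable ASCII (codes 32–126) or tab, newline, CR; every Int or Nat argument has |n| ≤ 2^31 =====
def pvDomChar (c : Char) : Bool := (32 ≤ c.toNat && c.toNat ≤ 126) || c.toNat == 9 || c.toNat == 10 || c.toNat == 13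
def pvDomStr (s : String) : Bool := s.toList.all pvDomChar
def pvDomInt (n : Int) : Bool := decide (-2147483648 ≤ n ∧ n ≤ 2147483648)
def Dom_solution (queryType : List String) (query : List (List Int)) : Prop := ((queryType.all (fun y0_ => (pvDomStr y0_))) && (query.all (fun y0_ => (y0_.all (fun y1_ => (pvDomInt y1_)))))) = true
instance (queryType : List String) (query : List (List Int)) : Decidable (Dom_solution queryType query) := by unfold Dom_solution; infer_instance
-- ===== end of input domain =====

-- B keeps the TRUE keys/values in the dict (rebuilding it on addToKey/addToValue)
-- instead of A's global key/value offsets: a different decomposition, not claimed faster.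

-- ===== PORT A =====
-- A's state: (total_val, total_key, total_get, hashmap); none = an exception was raised
-- (IndexError on param[0]/param[-1], KeyError on get) — those inputs are outside Pre_solution.
def stepA (s : Int × Int × Int × PySem.Dict Int Int) (cp : String × List Int) :
    Option (Int × Int × Int × PySem.Dict Int Int) :=
  match PySem.List.pyGet? cp.2 0, PySem.List.pyGet? cp.2 (-1) with
  | some x, some y =>
    let hm := if cp.1 = "insert" then s.2.2.2.insert (x - s.2.1) (y - s.1) else s.2.2.2
    match (if cp.1 = "get" then (hm.get? (x - s.2.1)).map (fun v => s.2.2.1 + (v + s.1)) else some s.2.2.1) with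
    | some tg =>
      let tk := if cp.1 = "addToKey" then s.2.1 + x else s.2.1
      let tv := if cp.1 = "addToValue" then s.1 + x else s.1
      some (tv, tk, tg, hm)
    | none => none
  | _, _ => none

def runA : List (String × List Int) → Option (Int × Int × Int × PySem.Dict Int Int) →
    Option (Int × Int × Int × PySem.Dict Int Int)
  | [], st => st
  | cp :: rest, st => runA rest (st.bind (fun s => stepA s cp))

def solution (queryType : List String) (query : List (List Int)) : Int :=
  match runA (queryType.zip query) (some (0, 0, 0, PySem.Dict.empty)) with
  | some s => s.2.2.1
  | none => 0

-- ===== PORT B =====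
-- B's state: (hashmap with true keys/values, total); none = exception (outside Pre_solution).
def stepB (s : PySem.Dict Int Int × Int) (cp : String × List Int) :
    Option (PySem.Dict Int Int × Int) :=
  if cp.1 = "insert" then
    match PySem.List.pyGet? cp.2 0, PySem.List.pyGet? cp.2 (-1) with
    | some x, some y => some (s.1.insert x y, s.2)
    | _, _ => none
  else if cp.1 = "get" then
    match PySem.List.pyGet? cp.2 0 with
    | some x => (s.1.get? x).map (fun v => (s.1, s.2 + v))
    | none => none
  else if cp.1 = "addToKey" then
    match PySem.List.pyGet? cp.2 0 with
    | some x => some (s.1.items.foldl (fun d kv => d.insert (kv.1 + x) kv.2) PySem.Dict.empty, s.2)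
    | none => none
  else if cp.1 = "addToValue" then
    match PySem.List.pyGet? cp.2 0 with
    | some x => some (s.1.items.foldl (fun d kv => d.insert kv.1 (kv.2 + x)) PySem.Dict.empty, s.2)
    | none => none
  else some s

def runB : List (String × List Int) → Option (PySem.Dict Int Int × Int) →
    Option (PySem.Dict Int Int × Int)
  | [], st => st
  | cp :: rest, st => runB rest (st.bind (fun s => stepB s cp))

def solution_alt (queryType : List String) (query : List (List Int)) : Int :=
  match runB (queryType.zip query) (some (PySem.Dict.empty, 0)) with
  | some s => s.2
  | none => 0

-- ===== PRECONDITION & SPEC =====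
-- Sum of the key shifts ('addToKey' amounts) over a prefix of the zipped query list.
def keyShift (l : List (String × List Int)) : Int :=
  (l.map (fun cp => if cp.1 = "addToKey" then cp.2.headI else 0)).sum

-- Pre_ = exactly the inputs on which A returns: every zipped param is nonempty (A reads
-- param[0]/param[-1] for every command) and every 'get' key was previously inserted
-- (true key = given key minus the addToKey shifts so far); elsewhere A raises
-- IndexError/KeyError.
def Pre_solution (queryType : List String) (query : List (List Int)) : Prop :=
  (∀ cp ∈ queryType.zip query, cp.2 ≠ []) ∧
  (∀ i < (queryType.zip query).length,
    ((queryType.zip query).getD i ("", [])).1 = "get" →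
      ∃ j < i, ((queryType.zip query).getD j ("", [])).1 = "insert" ∧
        ((queryType.zip query).getD j ("", [])).2.headI - keyShift ((queryType.zip query).take j)
          = ((queryType.zip query).getD i ("", [])).2.headI - keyShift ((queryType.zip query).take i))

instance (queryType : List String) (query : List (List Int)) : Decidable (Pre_solution queryType query) := by
  unfold Pre_solution; infer_instance

def pvWitness_solution : List String × List (List Int) :=
  (["insert", "addToKey", "addToValue", "get"], [[1, 5], [2], [3], [3]])

def Spec_solution (queryType : List String) (query : List (List Int)) (out : Int) : Prop := out = solution_alt queryType query
instance (queryType : List String) (query : List (List Int)) (out : Int) : Decidable (Spec_solution queryType query out) := by unfold Spec_solution; infer_instance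

-- ===== CLAIM (what is proved, stated in full; the proofs are below) =====
def Claim_equal_solution : Prop := ∀ (queryType : List String) (query : List (List Int)), Dom_solution queryType query → Pre_solution queryType query → Spec_solution queryType query (solution queryType query)

-- ===== LEMMAS AND PROOFS =====

-- param[0] on a nonempty list is its head
lemma pyGet_zero (p : List Int) (h : p ≠ []) : PySem.List.pyGet? p 0 = some p.headI := by
  cases p with
  | nil => simp at h
  | cons a t => simp [PySem.List.pyGet?, PySem.List.pyIdx?, List.headI]

-- param[-1] on a nonempty list returns some value
lemma pyGet_neg_one (p : List Int) (h : p ≠ []) : ∃ y, PySem.List.pyGet? p (-1) = some y := by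
  cases p with
  | nil => simp at h
  | cons a t =>
    have h1 : PySem.List.pyIdx? (t.length + 1) (-1) = some t.length := by
      simp [PySem.List.pyIdx?]
    refine ⟨(a :: t)[t.length]'(by simp), ?_⟩
    simp only [PySem.List.pyGet?, List.length_cons, h1]
    simp

-- lookup through the (+a, +b) key/value shift of the items list
lemma dget_shift (d : PySem.Dict Int Int) (k a b : Int) :
    (PySem.Dict.mk (d.items.map (fun kv => (kv.1 + a, kv.2 + b)))).get? (k + a)
      = (d.get? k).map (· + b) := by
  obtain ⟨l⟩ := d
  induction l with
  | nil => rfl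
  | cons hd tl ih =>
    rw [List.map_cons, PySem.Dict.get?_mk_cons, PySem.Dict.get?_mk_cons]
    by_cases hk : hd.1 = k
    · simp [hk]
    · have h1 : (hd.1 + a == k + a) = false := by simp; omega
      have h2 : (hd.1 == k) = false := by simp [hk]
      rw [h1, h2]; simpa using ih

-- membership through the key shift
lemma dcontains_shift (d : PySem.Dict Int Int) (k a b : Int) :
    (PySem.Dict.mk (d.items.map (fun kv => (kv.1 + a, kv.2 + b)))).contains (k + a)
      = d.contains k := by
  rw [PySem.Dict.contains_eq_decide_mem_keys, PySem.Dict.contains_eq_decide_mem_keys]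
  simp only [PySem.Dict.keys, List.map_map, List.mem_map]
  congr 1
  simp only [eq_iff_iff]
  constructor
  · rintro ⟨kv, hm, he⟩; exact ⟨kv, hm, by simp at he ⊢; omega⟩
  · rintro ⟨kv, hm, he⟩; exact ⟨kv, hm, by simp at he ⊢; omega⟩

-- insertion commutes with the key/value shift
lemma dinsert_shift (d : PySem.Dict Int Int) (k v a b : Int) :
    (PySem.Dict.mk (d.items.map (fun kv => (kv.1 + a, kv.2 + b)))).insert (k + a) (v + b)
      = PySem.Dict.mk ((d.insert k v).items.map (fun kv => (kv.1 + a, kv.2 + b))) := by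
  apply PySem.Dict.ext
  rw [PySem.Dict.items_insert, PySem.Dict.items_insert, dcontains_shift]
  by_cases hck : d.contains k
  · simp only [hck, if_true]
    show _ = List.map _ (List.map _ d.items)
    rw [List.map_map, List.map_map]
    apply List.map_congr_left
    intro kv _
    by_cases hk : kv.1 = k
    · simp [hk]
    · simp [hk]
  · simp [hck]

-- B's addToKey rebuild is the key-shift of the items list
lemma rebuild_key (d : PySem.Dict Int Int) (x : Int) (hnd : d.keys.Nodup) :
    d.items.foldl (fun dd kv => dd.insert (kv.1 + x) kv.2) PySem.Dict.empty
      = PySem.Dict.mk (d.items.map (fun kv => (kv.1 + x, kv.2))) := by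
  apply PySem.Dict.ext
  rw [PySem.Dict.items_foldl_insert_fresh]
  · rfl
  · intro a _; simp
  · have : (d.items.map (fun kv => kv.1 + x)) = d.keys.map (· + x) := by
      simp [PySem.Dict.keys, List.map_map]
    rw [this]
    exact hnd.map (fun p q h => by omega)

-- B's addToValue rebuild is the value-shift of the items list
lemma rebuild_val (d : PySem.Dict Int Int) (x : Int) (hnd : d.keys.Nodup) :
    d.items.foldl (fun dd kv => dd.insert kv.1 (kv.2 + x)) PySem.Dict.empty
      = PySem.Dict.mk (d.items.map (fun kv => (kv.1, kv.2 + x))) := by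
  apply PySem.Dict.ext
  rw [PySem.Dict.items_foldl_insert_fresh]
  · rfl
  · intro a _; simp
  · simpa [PySem.Dict.keys] using hnd

lemma keyShift_append (l1 l2 : List (String × List Int)) :
    keyShift (l1 ++ l2) = keyShift l1 + keyShift l2 := by
  simp [keyShift]

-- the true key inserted/looked up at step j of A
def trueKey (L : List (String × List Int)) (j : Nat) : Int :=
  (L.getD j ("", [])).2.headI - keyShift (L.take j)

-- keys of the shifted dict stay Nodup
lemma nodup_shift (d : PySem.Dict Int Int) (a b : Int) (hnd : d.keys.Nodup) :
    (PySem.Dict.mk (d.items.map (fun kv => (kv.1 + a, kv.2 + b)))).keys.Nodup := by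
  simp only [PySem.Dict.keys, List.map_map]
  have : ((fun p : Int × Int => p.1) ∘ (fun kv : Int × Int => (kv.1 + a, kv.2 + b)))
       = (fun k => k + a) ∘ (fun p : Int × Int => p.1) := by
    funext kv; rfl
  rw [this, ← List.map_map]
  exact (hnd.map (fun p q h => by omega))

lemma runA_cons (cp : String × List Int) (rest : List (String × List Int))
    (st : Int × Int × Int × PySem.Dict Int Int) :
    runA (cp :: rest) (some st) = runA rest (stepA st cp) := rfl

lemma runB_cons (cp : String × List Int) (rest : List (String × List Int))
    (st : PySem.Dict Int Int × Int) :
    runB (cp :: rest) (some st) = runB rest (stepB st cp) := rfl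

-- the main loop invariant: A's offset state corresponds to B's true-key dict
lemma run_agree (L : List (String × List Int))
    (hne : ∀ cp ∈ L, cp.2 ≠ [])
    (hget : ∀ i < L.length, (L.getD i ("", [])).1 = "get" →
       ∃ j < i, (L.getD j ("", [])).1 = "insert" ∧ trueKey L j = trueKey L i) :
    ∀ (rest : List (String × List Int)) (n : Nat) (tv tk tg : Int) (hmA : PySem.Dict Int Int),
      L.drop n = rest →
      tk = keyShift (L.take n) →
      hmA.keys.Nodup →
      (∀ k : Int, hmA.contains k = true ↔ ∃ j < n, (L.getD j ("", [])).1 = "insert" ∧ trueKey L j = k) →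
      ∃ s t, runA rest (some (tv, tk, tg, hmA)) = some s ∧
        runB rest (some (PySem.Dict.mk (hmA.items.map (fun kv => (kv.1 + tk, kv.2 + tv))), tg)) = some t ∧
        s.2.2.1 = t.2 := by
  intro rest
  induction rest with
  | nil =>
    intro n tv tk tg hmA _ _ _ _
    exact ⟨_, _, rfl, rfl, rfl⟩
  | cons cp rest' ih =>
    intro n tv tk tg hmA hdrop htk hnd hchar
    have hLn : L[n]? = some cp := by
      have h0 : (L.drop n)[0]? = some cp := by rw [hdrop]; rfl
      rwa [List.getElem?_drop, Nat.add_zero] at h0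
    have hnlt : n < L.length := by
      by_contra hc
      rw [List.getElem?_eq_none (by omega)] at hLn
      simp at hLn
    have hgetDn : L.getD n ("", []) = cp := by
      rw [List.getD_eq_getElem?_getD, hLn]; rfl
    have hcpmem : cp ∈ L := List.mem_of_getElem? hLn
    have hdrop' : L.drop (n + 1) = rest' := by
      have : L.drop (n + 1) = (L.drop n).drop 1 := by
        rw [List.drop_drop]
      rw [this, hdrop]; rfl
    have htake : L.take (n + 1) = L.take n ++ [cp] := by
      rw [List.take_add_one, hLn]; rfl
    have hks : keyShift (L.take (n + 1)) = tk + (if cp.1 = "addToKey" then cp.2.headI else 0) := by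
      rw [htake, keyShift_append, ← htk]; simp [keyShift]
    have hpne : cp.2 ≠ [] := hne cp hcpmem
    have hx : PySem.List.pyGet? cp.2 0 = some cp.2.headI := pyGet_zero _ hpne
    obtain ⟨y, hy⟩ := pyGet_neg_one cp.2 hpne
    -- extend the contains-characterisation from n to n+1 steps when step n is not an insert
    have hext : cp.1 ≠ "insert" →
        (∀ k : Int, hmA.contains k = true ↔
          ∃ j < n + 1, (L.getD j ("", [])).1 = "insert" ∧ trueKey L j = k) := by
      intro hno k
      rw [hchar k]
      constructor
      · rintro ⟨j, hj, hp⟩; exact ⟨j, Nat.lt_succ_of_lt hj, hp⟩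
      · rintro ⟨j, hj, hins, hk⟩
        rcases Nat.lt_succ_iff_lt_or_eq.mp hj with h | h
        · exact ⟨j, h, hins, hk⟩
        · subst h; rw [hgetDn] at hins; exact absurd hins hno
    by_cases h1 : cp.1 = "insert"
    · -- A inserts at the shifted key, B at the true key
      have hstepA : stepA (tv, tk, tg, hmA) cp
          = some (tv, tk, tg, hmA.insert (cp.2.headI - tk) (y - tv)) := by
        simp [stepA, hx, hy, h1]
      have hins : (PySem.Dict.mk (hmA.items.map (fun kv => (kv.1 + tk, kv.2 + tv)))).insert cp.2.headI y
          = PySem.Dict.mk ((hmA.insert (cp.2.headI - tk) (y - tv)).items.map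
              (fun kv => (kv.1 + tk, kv.2 + tv))) := by
        have := dinsert_shift hmA (cp.2.headI - tk) (y - tv) tk tv
        simpa using this
      have hstepB : stepB (PySem.Dict.mk (hmA.items.map (fun kv => (kv.1 + tk, kv.2 + tv))), tg) cp
          = some (PySem.Dict.mk ((hmA.insert (cp.2.headI - tk) (y - tv)).items.map
              (fun kv => (kv.1 + tk, kv.2 + tv))), tg) := by
        simp [stepB, hx, hy, h1, hins]
      have hchar' : ∀ k : Int, (hmA.insert (cp.2.headI - tk) (y - tv)).contains k = true ↔
          ∃ j < n + 1, (L.getD j ("", [])).1 = "insert" ∧ trueKey L j = k := by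
        intro k
        rw [PySem.Dict.contains_insert]
        constructor
        · intro hc
          rcases Bool.or_eq_true_iff.mp hc with hc | hc
          · refine ⟨n, Nat.lt_succ_self n, by rw [hgetDn]; exact h1, ?_⟩
            have : k = cp.2.headI - tk := by simpa using hc
            rw [trueKey, hgetDn, ← htk, this]
          · obtain ⟨j, hj, hp⟩ := (hchar k).mp hc
            exact ⟨j, Nat.lt_succ_of_lt hj, hp⟩
        · rintro ⟨j, hj, hins, hk⟩
          rcases Nat.lt_succ_iff_lt_or_eq.mp hj with h | h
          · exact Bool.or_eq_true_iff.mpr (Or.inr ((hchar k).mpr ⟨j, h, hins, hk⟩))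
          · subst h
            rw [trueKey, hgetDn, ← htk] at hk
            exact Bool.or_eq_true_iff.mpr (Or.inl (by simp [← hk]))
      have htk' : tk = keyShift (L.take (n + 1)) := by
        rw [hks, h1]; simp
      obtain ⟨s, t, hA, hB, hst⟩ := ih (n + 1) tv tk tg
        (hmA.insert (cp.2.headI - tk) (y - tv)) hdrop' htk'
        (PySem.Dict.nodup_keys_insert _ _ _ hnd) hchar'
      exact ⟨s, t, by rw [runA_cons, hstepA]; exact hA,
             by rw [runB_cons, hstepB]; exact hB, hst⟩
    · by_cases h2 : cp.1 = "get"
      · -- the queried key is present: Pre_ provides an earlier insert with the same true key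
        obtain ⟨j, hj, hins, hkey⟩ := hget n hnlt (by rw [hgetDn]; exact h2)
        have hcont : hmA.contains (cp.2.headI - tk) = true := by
          refine (hchar _).mpr ⟨j, hj, hins, ?_⟩
          rw [hkey, trueKey, hgetDn, ← htk]
        obtain ⟨v, hv⟩ : ∃ v, hmA.get? (cp.2.headI - tk) = some v := by
          rw [PySem.Dict.contains_eq_isSome_get?] at hcont
          exact Option.isSome_iff_exists.mp hcont
        have hstepA : stepA (tv, tk, tg, hmA) cp = some (tv, tk, tg + (v + tv), hmA) := by
          simp [stepA, hx, hy, h1, h2, hv]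
        have hgetB : (PySem.Dict.mk (hmA.items.map (fun kv => (kv.1 + tk, kv.2 + tv)))).get? cp.2.headI
            = some (v + tv) := by
          have := dget_shift hmA (cp.2.headI - tk) tk tv
          rw [sub_add_cancel] at this
          rw [this, hv]; rfl
        have hstepB : stepB (PySem.Dict.mk (hmA.items.map (fun kv => (kv.1 + tk, kv.2 + tv))), tg) cp
            = some (PySem.Dict.mk (hmA.items.map (fun kv => (kv.1 + tk, kv.2 + tv))), tg + (v + tv)) := by
          simp [stepB, hx, h1, h2, hgetB]
        have htk' : tk = keyShift (L.take (n + 1)) := by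
          rw [hks, h2]; simp
        obtain ⟨s, t, hA, hB, hst⟩ := ih (n + 1) tv tk (tg + (v + tv)) hmA hdrop' htk' hnd (hext h1)
        exact ⟨s, t, by rw [runA_cons, hstepA]; exact hA,
               by rw [runB_cons, hstepB]; exact hB, hst⟩
      · by_cases h3 : cp.1 = "addToKey"
        · have hstepA : stepA (tv, tk, tg, hmA) cp = some (tv, tk + cp.2.headI, tg, hmA) := by
            simp [stepA, hx, hy, h1, h2, h3]
          have hreb : (PySem.Dict.mk (hmA.items.map (fun kv => (kv.1 + tk, kv.2 + tv)))).items.foldl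
                (fun dd kv => dd.insert (kv.1 + cp.2.headI) kv.2) PySem.Dict.empty
              = PySem.Dict.mk (hmA.items.map (fun kv => (kv.1 + (tk + cp.2.headI), kv.2 + tv))) := by
            rw [rebuild_key _ _ (nodup_shift hmA tk tv hnd)]
            apply PySem.Dict.ext
            show List.map _ (List.map _ _) = _
            rw [List.map_map]
            apply List.map_congr_left
            intro kv _
            show (kv.1 + tk + cp.2.headI, kv.2 + tv) = (kv.1 + (tk + cp.2.headI), kv.2 + tv)
            rw [add_assoc]
          have hstepB : stepB (PySem.Dict.mk (hmA.items.map (fun kv => (kv.1 + tk, kv.2 + tv))), tg) cp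
              = some (PySem.Dict.mk (hmA.items.map (fun kv => (kv.1 + (tk + cp.2.headI), kv.2 + tv))), tg) := by
            unfold stepB
            rw [h3, if_neg (by decide), if_neg (by decide), if_pos rfl, hx]
            show some ((PySem.Dict.mk (hmA.items.map (fun kv => (kv.1 + tk, kv.2 + tv)))).items.foldl
                (fun dd kv => dd.insert (kv.1 + cp.2.headI) kv.2) PySem.Dict.empty, tg) = _
            rw [hreb]
          have htk' : tk + cp.2.headI = keyShift (L.take (n + 1)) := by
            rw [hks, h3]; simp
          obtain ⟨s, t, hA, hB, hst⟩ := ih (n + 1) tv (tk + cp.2.headI) tg hmA hdrop' htk' hnd (hext h1)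
          exact ⟨s, t, by rw [runA_cons, hstepA]; exact hA,
                 by rw [runB_cons, hstepB]; exact hB, hst⟩
        · by_cases h4 : cp.1 = "addToValue"
          · have hstepA : stepA (tv, tk, tg, hmA) cp = some (tv + cp.2.headI, tk, tg, hmA) := by
              simp [stepA, hx, hy, h1, h2, h3, h4]
            have hreb : (PySem.Dict.mk (hmA.items.map (fun kv => (kv.1 + tk, kv.2 + tv)))).items.foldl
                  (fun dd kv => dd.insert kv.1 (kv.2 + cp.2.headI)) PySem.Dict.empty
                = PySem.Dict.mk (hmA.items.map (fun kv => (kv.1 + tk, kv.2 + (tv + cp.2.headI)))) := by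
              rw [rebuild_val _ _ (nodup_shift hmA tk tv hnd)]
              apply PySem.Dict.ext
              show List.map _ (List.map _ _) = _
              rw [List.map_map]
              apply List.map_congr_left
              intro kv _
              show (kv.1 + tk, kv.2 + tv + cp.2.headI) = (kv.1 + tk, kv.2 + (tv + cp.2.headI))
              rw [add_assoc]
            have hstepB : stepB (PySem.Dict.mk (hmA.items.map (fun kv => (kv.1 + tk, kv.2 + tv))), tg) cp
                = some (PySem.Dict.mk (hmA.items.map (fun kv => (kv.1 + tk, kv.2 + (tv + cp.2.headI)))), tg) := by
              unfold stepB
              rw [h4, if_neg (by decide), if_neg (by decide), if_neg (by decide), if_pos rfl, hx]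
              show some ((PySem.Dict.mk (hmA.items.map (fun kv => (kv.1 + tk, kv.2 + tv)))).items.foldl
                  (fun dd kv => dd.insert kv.1 (kv.2 + cp.2.headI)) PySem.Dict.empty, tg) = _
              rw [hreb]
            have htk' : tk = keyShift (L.take (n + 1)) := by
              rw [hks, h4]; simp
            obtain ⟨s, t, hA, hB, hst⟩ := ih (n + 1) (tv + cp.2.headI) tk tg hmA hdrop' htk' hnd (hext h1)
            exact ⟨s, t, by rw [runA_cons, hstepA]; exact hA,
                   by rw [runB_cons, hstepB]; exact hB, hst⟩
          · -- an unknown command changes nothing in either port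
            have hstepA : stepA (tv, tk, tg, hmA) cp = some (tv, tk, tg, hmA) := by
              simp [stepA, hx, hy, h1, h2, h3, h4]
            have hstepB : stepB (PySem.Dict.mk (hmA.items.map (fun kv => (kv.1 + tk, kv.2 + tv))), tg) cp
                = some (PySem.Dict.mk (hmA.items.map (fun kv => (kv.1 + tk, kv.2 + tv))), tg) := by
              simp [stepB, h1, h2, h3, h4]
            have htk' : tk = keyShift (L.take (n + 1)) := by
              rw [hks, if_neg h3]; simp
            obtain ⟨s, t, hA, hB, hst⟩ := ih (n + 1) tv tk tg hmA hdrop' htk' hnd (hext h1)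
            exact ⟨s, t, by rw [runA_cons, hstepA]; exact hA,
                   by rw [runB_cons, hstepB]; exact hB, hst⟩

-- ===== VERDICT (by name: the statement is the Claim_ definition above) =====
theorem solution_spec : Claim_equal_solution := by
  unfold Claim_equal_solution
  intro queryType query _ hpre
  obtain ⟨hne, hget⟩ := hpre
  unfold Spec_solution solution solution_alt
  obtain ⟨s, t, hA, hB, hst⟩ := run_agree (queryType.zip query) hne
    (by intro i hi hg; exact hget i hi hg)
    (queryType.zip query) 0 0 0 0 PySem.Dict.empty rfl rfl
    (by simpa using PySem.Dict.nodup_keys_empty)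
    (by intro k; simp [PySem.Dict.contains_empty])
  rw [hA]
  have hB' : runB (queryType.zip query) (some (PySem.Dict.empty, 0)) = some t := by
    simpa using hB
  rw [hB']
  exact hst
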